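-- pv_equiv track=rewrite | github.com/posl/comment_recommendation | script/split_gen/2_time/zh/179_D/4.py | solve
-- ===== SOURCE A (Python) =====
-- def solve(n):
--     count = 0
--     for c in range(1, n):
--         if n % c == 0:
--             count += n // c - 1
--         else:
--             count += n // c
--     return count
-- ===== SOURCE B (Python) =====
-- def solve(n):
--     # Identity: sum_{c=1}^{n-1} (n//c - [c divides n]) = sum_{c=1}^{m} m//c with m = n-1,
--     # computed by divisor-block summation in O(sqrt(n)).
--     m = n - 1
--     if m <= 0:
--         return 0
--     total = 0
--     c = 1
--     while c <= m:
--         q = m // c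
--         r = m // q
--         total += q * (r - c + 1)
--         c = r + 1
--     return total
-- ===== Notes on version B (the rewrite author's own statement) =====
-- stated objective: faster
-- what changed: B replaces the linear scan with divisor test by the identity sum_{c<n}(n//c - [c|n]) = sum_{c<=n-1}(n-1)//c and computes that single sum by divisor-block (hyperbola) summation in O(sqrt(n)).
import Mathlib
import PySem

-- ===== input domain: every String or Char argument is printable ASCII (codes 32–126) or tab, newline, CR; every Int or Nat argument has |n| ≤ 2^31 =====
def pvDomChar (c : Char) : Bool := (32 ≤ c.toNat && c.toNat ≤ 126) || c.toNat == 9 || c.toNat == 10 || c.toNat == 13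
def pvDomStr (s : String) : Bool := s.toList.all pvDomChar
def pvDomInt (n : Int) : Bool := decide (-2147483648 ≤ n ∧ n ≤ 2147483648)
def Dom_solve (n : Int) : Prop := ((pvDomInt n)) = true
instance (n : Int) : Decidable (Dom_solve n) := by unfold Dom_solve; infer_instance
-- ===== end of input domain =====

-- B is faster: one divisor-block pass over m = n-1 instead of a linear scan with a divisor test.

-- ===== PORT A =====
def solve (n : Int) : Int :=
  (PySem.List.pyRange 1 n 1).foldl
    (fun count c =>
      if PySem.Int.mod n c == 0 then count + (PySem.Int.floordiv n c - 1)
      else count + PySem.Int.floordiv n c) 0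

-- ===== PORT B =====
-- termination fact for the while loop: c ≤ m / (m / c) when 0 < c ∧ c ≤ m
theorem pvB_le_div_div (m c : Nat) (hc : 0 < c) (hcm : c ≤ m) : c ≤ m / (m / c) := by
  have hq : 0 < m / c := Nat.div_pos hcm hc
  exact (Nat.le_div_iff_mul_le hq).2 (by calc c * (m / c) = m / c * c := Nat.mul_comm _ _
                                           _ ≤ m := Nat.div_mul_le_self m c)

-- the while loop of Source B (q = m // c, r = m // q written inline); all quantities are
-- nonnegative on this range, so Nat // and - coincide exactly with Python's (r ≥ c)
def bsum (m c total : Nat) : Nat :=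
  if h : 0 < c ∧ c ≤ m then
    bsum m (m / (m / c) + 1) (total + (m / c) * (m / (m / c) - c + 1))
  else total
termination_by m + 1 - c
decreasing_by
  have := pvB_le_div_div m c h.1 h.2
  omega

def solve_alt (n : Int) : Int :=
  if n - 1 ≤ 0 then 0 else (bsum (n - 1).toNat 1 0 : Int)   -- m = n - 1 inlined

-- ===== PRECONDITION & SPEC =====
def Spec_solve (n : Int) (out : Int) : Prop := out = solve_alt n
instance (n : Int) (out : Int) : Decidable (Spec_solve n out) := by unfold Spec_solve; infer_instance

-- ===== CLAIM (what is proved, stated in full; the proofs are below) =====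
def Claim_equal_solve : Prop := ∀ (n : Int), Dom_solve n → Spec_solve n (solve n)

-- ===== LEMMAS AND PROOFS =====

-- cast a list sum of Nat terms
theorem pv_sum_map_cast (l : List Nat) (f : Nat → Nat) :
    (l.map (fun x => ((f x : Nat) : Int))).sum = ((l.map f).sum : Int) := by
  induction l with
  | nil => simp
  | cons a t ih => simp [ih]

-- the per-step identity of A, in Nat: for 1 ≤ c < N,
-- N/c minus (one if c divides N) equals (N-1)/c
theorem pv_step (N c : Nat) (hc : 0 < c) (hcN : c < N) :
    (if N % c = 0 then ((N / c : Nat) : Int) - 1 else ((N / c : Nat) : Int))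
      = (((N - 1) / c : Nat) : Int) := by
  have hq := Nat.div_add_mod N c
  have hr : N % c < c := Nat.mod_lt _ hc
  by_cases h0 : N % c = 0
  · have hq1 : 1 ≤ N / c := (Nat.one_le_div_iff hc).2 hcN.le
    have hmul := Nat.mul_sub c (N / c) 1
    have hN1 : N - 1 = c * (N / c - 1) + (c - 1) := by rw [hmul]; omega
    have hdiv : (N - 1) / c = N / c - 1 := by
      rw [hN1, Nat.mul_add_div hc, Nat.div_eq_of_lt (show c - 1 < c by omega)]
      omega
    rw [if_pos h0, hdiv]; omega
  · have hN1 : N - 1 = c * (N / c) + (N % c - 1) := by omega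
    have hdiv : (N - 1) / c = N / c := by
      rw [hN1, Nat.mul_add_div hc, Nat.div_eq_of_lt (show N % c - 1 < c by omega)]
      omega
    rw [if_neg h0, hdiv]

-- on a block [l, m/(m/l)] the quotient m/c is constant
theorem pv_block_const (m l c : Nat) (hl : 0 < l) (hlm : l ≤ m)
    (h1 : l ≤ c) (h2 : c ≤ m / (m / l)) : m / c = m / l := by
  have hq : 0 < m / l := Nat.div_pos hlm hl
  have hcq : c * (m / l) ≤ m := (Nat.le_div_iff_mul_le hq).1 h2
  have hc : 0 < c := Nat.lt_of_lt_of_le hl h1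
  have hle : m / c ≤ m / l := Nat.div_le_div_left h1 hl
  have hge : m / l ≤ m / c :=
    (Nat.le_div_iff_mul_le hc).2 (by rw [Nat.mul_comm]; exact hcq)
  omega

-- the while loop computes the remaining tail of the sum
theorem pv_bsum_aux (m : Nat) : ∀ (k l total : Nat), m + 1 - l ≤ k → 0 < l →
    bsum m l total = total + ∑ c ∈ Finset.Ico l (m + 1), m / c := by
  intro k
  induction k with
  | zero =>
    intro l total hk hl
    rw [bsum, dif_neg (by omega), Finset.Ico_eq_empty (by simp; omega)]
    simp
  | succ k ih =>
    intro l total hk hl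
    by_cases h : 0 < l ∧ l ≤ m
    · rw [bsum, dif_pos h]
      set q := m / l with hq
      set r := m / q with hr
      have hq0 : 0 < q := Nat.div_pos h.2 h.1
      have hlr : l ≤ r := by rw [hr, hq]; exact pvB_le_div_div m l h.1 h.2
      have hrm : r ≤ m := Nat.div_le_self m q
      rw [ih (r + 1) _ (by omega) (by omega)]
      have hsplit : Finset.Ico l (m + 1) = Finset.Ico l (r + 1) ∪ Finset.Ico (r + 1) (m + 1) :=
        (Finset.Ico_union_Ico_eq_Ico (by omega) (by omega)).symm
      have hconst : ∑ c ∈ Finset.Ico l (r + 1), m / c = ∑ _c ∈ Finset.Ico l (r + 1), q :=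
        Finset.sum_congr rfl (fun c hc => by
          rw [Finset.mem_Ico] at hc
          exact pv_block_const m l c h.1 h.2 hc.1 (by rw [← hq, ← hr]; omega))
      have hcard : ∑ _c ∈ Finset.Ico l (r + 1), q = (r + 1 - l) * q := by
        rw [Finset.sum_const, Nat.card_Ico, smul_eq_mul]
      have harith : (r + 1 - l) * q = q * (r - l + 1) := by
        rw [Nat.mul_comm]; congr 1; omega
      rw [hsplit, Finset.sum_union (Finset.Ico_disjoint_Ico_consecutive _ _ _),
        hconst, hcard, harith]
      ring
    · rw [bsum, dif_neg h, Finset.Ico_eq_empty (by simp; omega)]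
      simp

theorem pv_bsum_eq (m l total : Nat) (hl : 0 < l) :
    bsum m l total = total + ∑ c ∈ Finset.Ico l (m + 1), m / c :=
  pv_bsum_aux m (m + 1 - l) l total le_rfl hl

-- turn A's fold into a sum of per-step terms
theorem pv_solve_sum (n : Int) :
    solve n = ((PySem.List.pyRange 1 n 1).map
      (fun c => if PySem.Int.mod n c == 0 then PySem.Int.floordiv n c - 1
                else PySem.Int.floordiv n c)).sum := by
  unfold solve
  have hfun : (fun (count c : Int) =>
      if PySem.Int.mod n c == 0 then count + (PySem.Int.floordiv n c - 1)
      else count + PySem.Int.floordiv n c)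
      = (fun (count c : Int) => count +
          (if PySem.Int.mod n c == 0 then PySem.Int.floordiv n c - 1
           else PySem.Int.floordiv n c)) := by
    funext count c; split <;> rfl
  rw [hfun, PySem.List.foldl_add]
  simp

theorem pv_list_sum_eq_finset (m : Nat) (f : Nat → Nat) :
    ((List.range m).map f).sum = ∑ k ∈ Finset.range m, f k := by
  induction m with
  | zero => simp
  | succ k ih =>
    rw [List.range_succ, Finset.sum_range_succ, List.map_append, List.sum_append, ih]; simp

-- ===== VERDICT (by name: the statement is the Claim_ definition above) =====
theorem solve_spec : Claim_equal_solve := by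
  intro n _
  unfold Spec_solve solve_alt
  by_cases hn : n - 1 ≤ 0
  · rw [if_pos hn, pv_solve_sum, PySem.List.pyRange_one_eq_nil (by omega)]
    simp
  · rw [if_neg hn]
    set N : Nat := n.toNat with hN
    have hn2 : (N : Int) = n := Int.toNat_of_nonneg (by omega)
    have hN2 : 2 ≤ N := by omega
    set m : Nat := N - 1 with hm
    have hmn : (n - 1).toNat = m := by omega
    rw [pv_solve_sum, PySem.List.pyRange_one, List.map_map]
    have hterm : ∀ k ∈ List.range (n - 1).toNat,
        ((fun c => if PySem.Int.mod n c == 0 then PySem.Int.floordiv n c - 1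
                   else PySem.Int.floordiv n c) ∘ (fun k : Nat => (1 : Int) + k)) k
        = ((m / (1 + k) : Nat) : Int) := by
      intro k hk
      rw [List.mem_range] at hk
      simp only [Function.comp_apply]
      have hc1 : (1 : Int) + k = ((1 + k : Nat) : Int) := by push_cast; ring
      rw [hc1, ← hn2, PySem.Int.mod_natCast, PySem.Int.floordiv_natCast]
      have hstep := pv_step N (1 + k) (by omega) (by omega)
      by_cases hz : N % (1 + k) = 0
      · rw [if_pos (by simp only [beq_iff_eq, Int.natCast_eq_zero]; exact hz), hm]
        rw [if_pos hz] at hstep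
        exact hstep
      · rw [if_neg (by simp only [beq_iff_eq, Int.natCast_eq_zero]; exact hz), hm]
        rw [if_neg hz] at hstep
        exact hstep
    rw [List.map_congr_left hterm, hmn,
      pv_sum_map_cast (List.range m) (fun k => m / (1 + k))]
    congr 1
    rw [pv_list_sum_eq_finset, pv_bsum_eq m 1 0 (by omega), Finset.sum_Ico_eq_sum_range]
    simp [Nat.add_comm]
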